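-- pv_equiv track=rewrite | github.com/Sianuga/SI-PWR | List2/halmaGame.py | formation_heuristic
-- ===== SOURCE A (Python) =====
-- def formation_heuristic(board, current_player):
--     formation_value = 0
--
--     for i in range(len(board)):
--         for j in range(len(board[i])):
--             if board[i][j] == current_player:
--
--                 neighbors = 0
--                 for dx in range(-1, 2):
--                     for dy in range(-1, 2):
--                         if dx == 0 and dy == 0:
--                             continue
--                         nx, ny = i + dx, j + dy
--                         if 0 <= nx < len(board) and 0 <= ny < len(board[0]) and board[nx][ny] == current_player:
--                             neighbors += 1
--                 formation_value += neighbors  # Higher values for more clustered pieces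
--
--     return formation_value
-- ===== SOURCE B (Python) =====
-- def formation_heuristic(board, current_player):
--     # Count each adjacent same-player pair once using only forward
--     # neighbors (right, down-left, down, down-right), then double it.
--     rows = len(board)
--     cols = len(board[0]) if board else 0
--     pairs = 0
--     for i in range(rows):
--         for j in range(len(board[i])):
--             if board[i][j] == current_player:
--                 for dx, dy in ((0, 1), (1, -1), (1, 0), (1, 1)):
--                     nx, ny = i + dx, j + dy
--                     if 0 <= nx < rows and 0 <= ny < cols and board[nx][ny] == current_player:
--                         pairs += 1
--     return 2 * pairs
-- ===== Notes on version B (the rewrite author's own statement) =====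
-- stated objective: alternative
-- what changed: B counts each same-player adjacency edge once by scanning only the four forward neighbors (right, down-left, down, down-right) and returns twice the pair count, instead of A's per-cell 8-direction neighbor count. Pre_ excludes ragged (non-rectangular) boards that contain current_player, on which A's 8-direction scan bounded by len(board[0]) can raise IndexError or count adjacencies asymmetrically so the edge-doubling identity fails; rectangular boards and boards without the player are admitted.
-- outside the precondition, e.g. on formation_heuristic([[1], [1, 1]], 1): A returns 4, B returns 2; on formation_heuristic([[0, 1], [0]], 1): A raises IndexError, B raises IndexError
import Mathlib
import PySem

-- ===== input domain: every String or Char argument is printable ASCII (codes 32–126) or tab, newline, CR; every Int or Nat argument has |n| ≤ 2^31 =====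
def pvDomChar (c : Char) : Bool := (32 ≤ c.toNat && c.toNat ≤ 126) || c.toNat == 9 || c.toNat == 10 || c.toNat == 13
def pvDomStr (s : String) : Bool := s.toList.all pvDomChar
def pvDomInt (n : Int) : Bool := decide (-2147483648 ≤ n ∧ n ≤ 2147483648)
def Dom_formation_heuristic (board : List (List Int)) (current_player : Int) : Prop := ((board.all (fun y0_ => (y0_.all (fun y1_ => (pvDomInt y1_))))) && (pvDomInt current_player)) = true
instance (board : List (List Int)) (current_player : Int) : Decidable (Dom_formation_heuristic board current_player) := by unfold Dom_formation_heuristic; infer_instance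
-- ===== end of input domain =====

-- B counts each same-player adjacency edge once via the four forward neighbors and doubles it,
-- instead of A's per-cell 8-direction count; proved equal on rectangular boards (Pre_).

-- ===== PORT A =====
def formation_heuristic (board : List (List Int)) (current_player : Int) : Int :=
  (PySem.List.pyRange 0 (board.length : Int) 1).foldl (fun formation_value i =>
    (PySem.List.pyRange 0 ((PySem.List.pyGetD board i []).length : Int) 1).foldl (fun formation_value j =>
      if PySem.List.pyGetD (PySem.List.pyGetD board i []) j 0 = current_player then
        formation_value +
          ((PySem.List.pyRange (-1) 2 1).foldl (fun neighbors dx =>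
            (PySem.List.pyRange (-1) 2 1).foldl (fun neighbors dy =>
              if dx = 0 ∧ dy = 0 then neighbors
              else
                -- board[nx][ny] ported with pyGetD: exact here because the guard ensures the
                -- indices are in range on rectangular boards (Pre_)
                if 0 ≤ i + dx ∧ i + dx < (board.length : Int) ∧ 0 ≤ j + dy ∧ j + dy < ((PySem.List.pyGetD board 0 []).length : Int) ∧
                    PySem.List.pyGetD (PySem.List.pyGetD board (i + dx) []) (j + dy) 0 = current_player then
                  neighbors + 1
                else neighbors) neighbors) 0)
      else formation_value) formation_value) 0

-- ===== PORT B =====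
def formation_heuristic_alt (board : List (List Int)) (current_player : Int) : Int :=
  let rows : Int := (board.length : Int)
  let cols : Int := if board.isEmpty then 0 else ((PySem.List.pyGetD board 0 []).length : Int)
  let pairs : Int :=
    (PySem.List.pyRange 0 rows 1).foldl (fun pairs i =>
      (PySem.List.pyRange 0 ((PySem.List.pyGetD board i []).length : Int) 1).foldl (fun pairs j =>
        if PySem.List.pyGetD (PySem.List.pyGetD board i []) j 0 = current_player then
          ([((0 : Int), (1 : Int)), (1, -1), (1, 0), (1, 1)]).foldl (fun pairs d =>
            if 0 ≤ i + d.1 ∧ i + d.1 < rows ∧ 0 ≤ j + d.2 ∧ j + d.2 < cols ∧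
                PySem.List.pyGetD (PySem.List.pyGetD board (i + d.1) []) (j + d.2) 0 = current_player then
              pairs + 1
            else pairs) pairs
        else pairs) pairs) 0
  2 * pairs

-- ===== PRECONDITION & SPEC =====
-- Pre_ excludes ragged (non-rectangular) boards that contain current_player, on which A's
-- 8-direction scan bounded by len(board[0]) can raise IndexError or count adjacencies
-- asymmetrically; rectangular boards and boards without the player are admitted.
def Pre_formation_heuristic (board : List (List Int)) (current_player : Int) : Prop :=
  (∀ r ∈ board, r.length = (PySem.List.pyGetD board 0 []).length) ∨ (∀ r ∈ board, current_player ∉ r)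
instance (board : List (List Int)) (current_player : Int) : Decidable (Pre_formation_heuristic board current_player) := by unfold Pre_formation_heuristic; infer_instance
def pvWitness_formation_heuristic : List (List Int) × Int := ([[1, 0], [0, 1]], 1)

def Spec_formation_heuristic (board : List (List Int)) (current_player : Int) (out : Int) : Prop := out = formation_heuristic_alt board current_player
instance (board : List (List Int)) (current_player : Int) (out : Int) : Decidable (Spec_formation_heuristic board current_player out) := by unfold Spec_formation_heuristic; infer_instance

-- ===== CLAIM (what is proved, stated in full; the proofs are below) =====
def Claim_equal_formation_heuristic : Prop := ∀ (board : List (List Int)) (current_player : Int), Dom_formation_heuristic board current_player → Pre_formation_heuristic board current_player → Spec_formation_heuristic board current_player (formation_heuristic board current_player)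

-- ===== LEMMAS AND PROOFS =====

-- cell occupancy by the current player together with the bounds checks, as one predicate
-- (abbrev so that Decidable instances are found structurally)
abbrev pvOcc (board : List (List Int)) (p : Int) (i j : Int) : Prop :=
  0 ≤ i ∧ i < (board.length : Int) ∧ 0 ≤ j ∧ j < ((PySem.List.pyGetD board 0 []).length : Int) ∧
    PySem.List.pyGetD (PySem.List.pyGetD board i []) j 0 = p

theorem pv_occ_def (board : List (List Int)) (p i j : Int) :
    (0 ≤ i ∧ i < (board.length : Int) ∧ 0 ≤ j ∧ j < ((PySem.List.pyGetD board 0 []).length : Int) ∧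
      PySem.List.pyGetD (PySem.List.pyGetD board i []) j 0 = p) = pvOcc board p i j := rfl

-- number of ordered occupied pairs at offset (d1, d2)
def pvT (board : List (List Int)) (p : Int) (d1 d2 : Int) : Int :=
  ∑ i ∈ Finset.range board.length, ∑ j ∈ Finset.range (PySem.List.pyGetD board 0 []).length,
    (if pvOcc board p (i : Int) (j : Int) ∧ pvOcc board p ((i : Int) + d1) ((j : Int) + d2) then (1 : Int) else 0)

theorem pv_ite_add_one (c : Prop) [Decidable c] (n : Int) :
    (if c then n + 1 else n) = n + (if c then (1 : Int) else 0) := by split <;> simp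

theorem pv_neigh8 (q : Int → Int → Prop) [∀ a b, Decidable (q a b)] (i j : Int) :
    (PySem.List.pyRange (-1) 2 1).foldl (fun neighbors dx =>
      (PySem.List.pyRange (-1) 2 1).foldl (fun neighbors dy =>
        if dx = 0 ∧ dy = 0 then neighbors
        else if q (i + dx) (j + dy) then neighbors + 1 else neighbors) neighbors) 0
    = (if q (i + -1) (j + -1) then (1:Int) else 0) + (if q (i + -1) (j + 0) then 1 else 0)
      + (if q (i + -1) (j + 1) then 1 else 0) + (if q (i + 0) (j + -1) then 1 else 0)
      + (if q (i + 0) (j + 1) then 1 else 0) + (if q (i + 1) (j + -1) then 1 else 0)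
      + (if q (i + 1) (j + 0) then 1 else 0) + (if q (i + 1) (j + 1) then 1 else 0) := by
  have hm : ((-1 : Int) = 0) = False := by norm_num
  have hp : ((1 : Int) = 0) = False := by norm_num
  rw [show PySem.List.pyRange (-1) 2 1 = [-1, 0, 1] from by decide]
  simp only [List.foldl_cons, List.foldl_nil, hm, hp, and_false, and_true, if_false, if_true,
    pv_ite_add_one]
  ring

theorem pv_neigh4 (q : Int → Int → Prop) [∀ a b, Decidable (q a b)] (i j a : Int) :
    ([((0 : Int), (1 : Int)), (1, -1), (1, 0), (1, 1)]).foldl (fun pairs d =>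
      if q (i + d.1) (j + d.2) then pairs + 1 else pairs) a
    = a + ((if q (i + 0) (j + 1) then (1 : Int) else 0) + (if q (i + 1) (j + -1) then 1 else 0)
      + (if q (i + 1) (j + 0) then 1 else 0) + (if q (i + 1) (j + 1) then 1 else 0)) := by
  simp only [List.foldl_cons, List.foldl_nil, pv_ite_add_one]
  ring

theorem pv_foldl_guard_add {α : Type} (l : List α) (c : α → Prop) [DecidablePred c] (g : α → Int) (a : Int) :
    l.foldl (fun acc x => if c x then acc + g x else acc) a
      = a + (l.map (fun x => if c x then g x else 0)).sum := by
  induction l generalizing a with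
  | nil => simp
  | cons x t ih => by_cases h : c x <;> simp [h, ih] <;> ring

theorem pv_sum_map_pyRange (n : ℕ) (f : Int → Int) :
    ((PySem.List.pyRange 0 (n : Int) 1).map f).sum = ∑ k ∈ Finset.range n, f (k : Int) := by
  induction n with
  | zero => simp [PySem.List.pyRange_one_eq_nil]
  | succ m ih =>
    rw [show ((m + 1 : ℕ) : Int) = (m : Int) + 1 by push_cast; ring,
      PySem.List.pyRange_one_succ_right (by positivity), List.map_append, List.sum_append,
      Finset.sum_range_succ, ih]
    simp

-- a guarded accumulating double loop over the board's index grid is a double Finset sum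
theorem pv_grid_fold (board : List (List Int)) (c : Int → Int → Prop) [∀ i j, Decidable (c i j)]
    (g : Int → Int → Int) :
    (PySem.List.pyRange 0 (board.length : Int) 1).foldl (fun a i =>
      (PySem.List.pyRange 0 ((PySem.List.pyGetD board i []).length : Int) 1).foldl
        (fun a j => if c i j then a + g i j else a) a) 0
    = ∑ i ∈ Finset.range board.length, ∑ j ∈ Finset.range (board.getD i []).length,
        (if c (i : Int) (j : Int) then g (i : Int) (j : Int) else 0) := by
  rw [PySem.List.foldl_congr_mem _ _ (fun a i =>
        a + ((PySem.List.pyRange 0 ((PySem.List.pyGetD board i []).length : Int) 1).map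
          (fun j => if c i j then g i j else 0)).sum) _
      (by intro acc x _; rw [pv_foldl_guard_add])]
  rw [PySem.List.foldl_add, zero_add, pv_sum_map_pyRange]
  refine Finset.sum_congr rfl fun k hk => ?_
  rw [PySem.List.pyGetD_natCast, pv_sum_map_pyRange]

theorem pv_getD_len (board : List (List Int))
    (hpre : ∀ r ∈ board, r.length = (PySem.List.pyGetD board 0 []).length)
    (k : ℕ) (hk : k < board.length) :
    (board.getD k []).length = (PySem.List.pyGetD board 0 []).length := by
  rw [List.getD_eq_getElem board [] hk]
  exact hpre _ (List.getElem_mem hk)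

theorem pv_occ_iff (board : List (List Int)) (p : Int) (k j : ℕ)
    (hk : k < board.length) (hj : j < (PySem.List.pyGetD board 0 []).length) :
    pvOcc board p (k : Int) (j : Int) ↔
      PySem.List.pyGetD (PySem.List.pyGetD board (k : Int) []) (j : Int) 0 = p := by
  constructor
  · exact fun h => h.2.2.2.2
  · intro h
    exact ⟨by positivity, by exact_mod_cast hk, by positivity, by exact_mod_cast hj, h⟩

theorem pv_A_eq (board : List (List Int)) (p : Int)
    (hpre : ∀ r ∈ board, r.length = (PySem.List.pyGetD board 0 []).length) :
    formation_heuristic board p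
      = pvT board p (-1) (-1) + pvT board p (-1) 0 + pvT board p (-1) 1 + pvT board p 0 (-1)
        + pvT board p 0 1 + pvT board p 1 (-1) + pvT board p 1 0 + pvT board p 1 1 := by
  unfold formation_heuristic
  simp only [pv_neigh8 (fun a b => 0 ≤ a ∧ a < (board.length : Int) ∧ 0 ≤ b ∧
    b < ((PySem.List.pyGetD board 0 []).length : Int) ∧
    PySem.List.pyGetD (PySem.List.pyGetD board a []) b 0 = p)]
  simp only [pv_occ_def]
  rw [pv_grid_fold board (fun i j => PySem.List.pyGetD (PySem.List.pyGetD board i []) j 0 = p)]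
  simp only [pvT, ← Finset.sum_add_distrib]
  refine Finset.sum_congr rfl fun k hk => ?_
  rw [pv_getD_len board hpre k (Finset.mem_range.mp hk)]
  refine Finset.sum_congr rfl fun j hj => ?_
  have hiff := pv_occ_iff board p k j (Finset.mem_range.mp hk) (Finset.mem_range.mp hj)
  by_cases h : PySem.List.pyGetD (PySem.List.pyGetD board (k : Int) []) (j : Int) 0 = p
  · have ho : pvOcc board p (k : Int) (j : Int) := hiff.mpr h
    have h2 := h
    simp only [PySem.List.pyGetD_natCast, List.getD] at h2
    have ht := eq_true ho
    simp only [ht, true_and]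
    simp [h2]
  · have ho : ¬ pvOcc board p (k : Int) (j : Int) := fun hp => h (hiff.mp hp)
    have h2 := h
    simp only [PySem.List.pyGetD_natCast, List.getD] at h2
    have ht := eq_false ho
    simp only [ht, false_and]
    simp [h2]

theorem pv_B_eq (board : List (List Int)) (p : Int)
    (hpre : ∀ r ∈ board, r.length = (PySem.List.pyGetD board 0 []).length) :
    formation_heuristic_alt board p
      = 2 * (pvT board p 0 1 + pvT board p 1 (-1) + pvT board p 1 0 + pvT board p 1 1) := by
  by_cases hb : board = []
  · subst hb
    simp [formation_heuristic_alt, pvT]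
  · have hbe : board.isEmpty = false := by simp [hb]
    unfold formation_heuristic_alt
    simp only [hbe, Bool.false_eq_true, if_false]
    simp only [pv_neigh4 (fun a b => 0 ≤ a ∧ a < (board.length : Int) ∧ 0 ≤ b ∧
      b < ((PySem.List.pyGetD board 0 []).length : Int) ∧
      PySem.List.pyGetD (PySem.List.pyGetD board a []) b 0 = p)]
    simp only [pv_occ_def]
    rw [pv_grid_fold board (fun i j => PySem.List.pyGetD (PySem.List.pyGetD board i []) j 0 = p)]
    congr 1
    simp only [pvT, ← Finset.sum_add_distrib]
    refine Finset.sum_congr rfl fun k hk => ?_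
    rw [pv_getD_len board hpre k (Finset.mem_range.mp hk)]
    refine Finset.sum_congr rfl fun j hj => ?_
    have hiff := pv_occ_iff board p k j (Finset.mem_range.mp hk) (Finset.mem_range.mp hj)
    by_cases h : PySem.List.pyGetD (PySem.List.pyGetD board (k : Int) []) (j : Int) 0 = p
    · have ho : pvOcc board p (k : Int) (j : Int) := hiff.mpr h
      have h2 := h
      simp only [PySem.List.pyGetD_natCast, List.getD] at h2
      have ht := eq_true ho
      simp only [ht, true_and]
      simp [h2]
    · have ho : ¬ pvOcc board p (k : Int) (j : Int) := fun hp => h (hiff.mp hp)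
      have h2 := h
      simp only [PySem.List.pyGetD_natCast, List.getD] at h2
      have ht := eq_false ho
      simp only [ht, false_and]
      simp [h2]

-- a cell read inside the loop ranges is a member of its row
theorem pv_cell_mem (board : List (List Int)) (p : Int)
    (h : ∀ r ∈ board, p ∉ r) (i j : Int)
    (hi : 0 ≤ i ∧ i < (board.length : Int))
    (hj : 0 ≤ j ∧ j < ((PySem.List.pyGetD board i []).length : Int)) :
    ¬ PySem.List.pyGetD (PySem.List.pyGetD board i []) j 0 = p := by
  obtain ⟨hi0, hi1⟩ := hi
  obtain ⟨hj0, hj1⟩ := hj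
  rw [PySem.List.pyGetD_of_nonneg board [] hi0] at hj1 ⊢
  have hilt : i.toNat < board.length := by omega
  rw [List.getD_eq_getElem board [] hilt] at hj1 ⊢
  have hjlt : j.toNat < board[i.toNat].length := by omega
  rw [PySem.List.pyGetD_eq_getElem _ 0 hj0 (by omega)]
  intro hc
  exact h _ (List.getElem_mem hilt) (hc ▸ List.getElem_mem hjlt)

-- if the player occurs nowhere, A's loops never fire and A returns 0
theorem pv_no_occ_A (board : List (List Int)) (p : Int)
    (h : ∀ r ∈ board, p ∉ r) : formation_heuristic board p = 0 := by
  unfold formation_heuristic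
  rw [PySem.List.foldl_congr_mem _ _ (fun a _ => a) _ ?_, PySem.List.foldl_ignore]
  intro acc i hi
  rw [PySem.List.foldl_congr_mem _ _ (fun a _ => a) _ ?_, PySem.List.foldl_ignore]
  intro acc' j hj
  rw [if_neg (pv_cell_mem board p h i j
    (by simpa using PySem.List.mem_pyRange_one.mp hi)
    (by simpa using PySem.List.mem_pyRange_one.mp hj))]

-- if the player occurs nowhere, B's loops never fire either and B returns 2 * 0
theorem pv_no_occ_B (board : List (List Int)) (p : Int)
    (h : ∀ r ∈ board, p ∉ r) : formation_heuristic_alt board p = 0 := by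
  unfold formation_heuristic_alt
  dsimp only
  rw [PySem.List.foldl_congr_mem _ _ (fun a _ => a) _ ?_, PySem.List.foldl_ignore, mul_zero]
  intro acc i hi
  rw [PySem.List.foldl_congr_mem _ _ (fun a _ => a) _ ?_, PySem.List.foldl_ignore]
  intro acc' j hj
  rw [if_neg (pv_cell_mem board p h i j
    (by simpa using PySem.List.mem_pyRange_one.mp hi)
    (by simpa using PySem.List.mem_pyRange_one.mp hj))]

-- reversing the offset reverses each ordered pair, a bijection on the nonzero terms
theorem pv_T_flip (board : List (List Int)) (p : Int) (d1 d2 : Int) :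
    pvT board p d1 d2 = pvT board p (-d1) (-d2) := by
  unfold pvT
  rw [← Finset.sum_product', ← Finset.sum_product']
  refine Finset.sum_bij_ne_zero
    (fun a _ _ => (((a.1 : Int) + d1).toNat, ((a.2 : Int) + d2).toNat)) ?_ ?_ ?_ ?_
  · rintro ⟨a1, a2⟩ h1 h2
    rw [ne_eq, ite_eq_right_iff] at h2
    have hc : pvOcc board p (a1 : Int) (a2 : Int) ∧ pvOcc board p ((a1 : Int) + d1) ((a2 : Int) + d2) := by
      by_contra hc; simp [hc] at h2
    obtain ⟨-, h0, hR, h0', hC, -⟩ := hc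
    simp only [Finset.mem_product, Finset.mem_range]
    constructor <;> omega
  · rintro ⟨a1, a2⟩ h11 h12 ⟨b1, b2⟩ h21 h22 heq
    rw [ne_eq, ite_eq_right_iff] at h12 h22
    have hca : pvOcc board p (a1 : Int) (a2 : Int) ∧ pvOcc board p ((a1 : Int) + d1) ((a2 : Int) + d2) := by
      by_contra hc; simp [hc] at h12
    have hcb : pvOcc board p (b1 : Int) (b2 : Int) ∧ pvOcc board p ((b1 : Int) + d1) ((b2 : Int) + d2) := by
      by_contra hc; simp [hc] at h22
    obtain ⟨-, ha0, -, ha0', -, -⟩ := hca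
    obtain ⟨-, hb0, -, hb0', -, -⟩ := hcb
    simp only [Prod.mk.injEq] at heq ⊢
    omega
  · rintro ⟨b1, b2⟩ hb hb2
    rw [ne_eq, ite_eq_right_iff] at hb2
    have hcb : pvOcc board p (b1 : Int) (b2 : Int) ∧ pvOcc board p ((b1 : Int) + -d1) ((b2 : Int) + -d2) := by
      by_contra hc; simp [hc] at hb2
    obtain ⟨hcb1, hcb2⟩ := hcb
    obtain ⟨h0, hR, h0', hC, hv⟩ := hcb2
    refine ⟨(((b1 : Int) - d1).toNat, ((b2 : Int) - d2).toNat), ?_, ?_, ?_⟩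
    · simp only [Finset.mem_product, Finset.mem_range]; constructor <;> omega
    · rw [ne_eq, ite_eq_right_iff]
      intro h
      have e1 : ((((b1 : Int) - d1).toNat : Int)) = (b1 : Int) - d1 := Int.toNat_of_nonneg (by omega)
      have e2 : ((((b2 : Int) - d2).toNat : Int)) = (b2 : Int) - d2 := Int.toNat_of_nonneg (by omega)
      refine one_ne_zero (h ?_)
      simp only [e1, e2]
      constructor
      · exact ⟨by omega, by omega, by omega, by omega, by simpa [sub_eq_add_neg] using hv⟩
      · simpa [sub_add_cancel] using hcb1
    · have e1 : ((((b1 : Int) - d1).toNat : Int)) = (b1 : Int) - d1 := Int.toNat_of_nonneg (by omega)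
      have e2 : ((((b2 : Int) - d2).toNat : Int)) = (b2 : Int) - d2 := Int.toNat_of_nonneg (by omega)
      simp only [Prod.mk.injEq]
      constructor <;> omega
  · rintro ⟨a1, a2⟩ h1 h2
    rw [ne_eq, ite_eq_right_iff] at h2
    have hca : pvOcc board p (a1 : Int) (a2 : Int) ∧ pvOcc board p ((a1 : Int) + d1) ((a2 : Int) + d2) := by
      by_contra hc; simp [hc] at h2
    obtain ⟨hc1, hc2⟩ := hca
    have h0 := hc2.1
    have h0' := hc2.2.2.1
    have e1 : ((((a1 : Int) + d1).toNat : Int)) = (a1 : Int) + d1 := Int.toNat_of_nonneg h0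
    have e2 : ((((a2 : Int) + d2).toNat : Int)) = (a2 : Int) + d2 := Int.toNat_of_nonneg h0'
    rw [if_pos ⟨hc1, hc2⟩, if_pos]
    rw [e1, e2]
    refine ⟨hc2, ?_⟩
    simpa [add_neg_cancel_right] using hc1

-- ===== VERDICT (by name: the statement is the Claim_ definition above) =====
theorem formation_heuristic_spec : Claim_equal_formation_heuristic := by
  intro board p _ hpre
  show formation_heuristic board p = formation_heuristic_alt board p
  rcases hpre with hpre | hno
  case inr => rw [pv_no_occ_A board p hno, pv_no_occ_B board p hno]
  rw [pv_A_eq board p hpre, pv_B_eq board p hpre,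
    pv_T_flip board p (-1) (-1), pv_T_flip board p (-1) 0, pv_T_flip board p (-1) 1,
    pv_T_flip board p 0 (-1)]
  norm_num
  ring
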